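-- pv_equiv track=rewrite | github.com/andeteyker/AI-Programming | mian.py | _tokenize_for_decimal
-- ===== SOURCE A (Python) =====
-- from typing import Callable, Dict, List
--
-- def _tokenize_for_decimal(expression: str) -> List[str]:
--     token = ""
--     tokens = []
--     for char in expression:
--         if char.isdigit() or char == ".":
--             token += char
--         else:
--             if token:
--                 tokens.append(token)
--                 token = ""
--     if token:
--         tokens.append(token)
--     return tokens
-- ===== SOURCE B (Python) =====
-- from itertools import groupby
-- from typing import List
--
-- def _tokenize_for_decimal(expression: str) -> List[str]:
--     return ["".join(g) for k, g in groupby(expression, key=lambda c: c.isdigit() or c == ".") if k]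
-- ===== Notes on version B (the rewrite author's own statement) =====
-- stated objective: idiomatic
-- what changed: Replaces the manual token accumulator with flush-at-boundary by itertools.groupby on the same per-char predicate, joining the digit/dot groups and discarding the rest.
import Mathlib
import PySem

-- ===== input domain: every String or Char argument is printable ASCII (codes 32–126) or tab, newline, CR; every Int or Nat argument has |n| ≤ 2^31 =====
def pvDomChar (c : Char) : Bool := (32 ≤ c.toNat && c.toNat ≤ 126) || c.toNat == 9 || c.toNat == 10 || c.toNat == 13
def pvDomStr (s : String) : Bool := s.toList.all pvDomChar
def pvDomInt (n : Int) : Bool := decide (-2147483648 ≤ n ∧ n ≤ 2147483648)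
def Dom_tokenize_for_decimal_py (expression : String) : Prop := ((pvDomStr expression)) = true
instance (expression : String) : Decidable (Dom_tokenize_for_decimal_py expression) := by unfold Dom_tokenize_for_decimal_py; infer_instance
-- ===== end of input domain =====

-- ===== PORT A =====
-- B rewrites A's manual accumulator/flush loop as a groupby over the same predicate (idiomatic decomposition).
-- token is represented as its character list; String.mk is applied when appending to tokens.
def tokenize_for_decimal_py (expression : String) : List String :=
  let st := expression.toList.foldl
    (fun (s : List Char × List String) char =>
      if PySem.Chars.isdigit char || char == '.' then (s.1 ++ [char], s.2)
      else if s.1 ≠ [] then ([], s.2 ++ [String.mk s.1]) else s)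
    ([], [])
  if st.1 ≠ [] then st.2 ++ [String.mk st.1] else st.2

-- ===== PORT B =====
-- the groupby key: c.isdigit() or c == "."
def pvTokKey (c : Char) : Bool := PySem.Chars.isdigit c || c == '.'

-- groupby over the key, joining True-groups and skipping False-chars (port of the itertools.groupby comprehension)
def pvTokGroups : List Char → List String
  | [] => []
  | c :: cs =>
    if pvTokKey c then
      String.mk ((c :: cs).takeWhile pvTokKey) :: pvTokGroups ((c :: cs).dropWhile pvTokKey)
    else
      pvTokGroups cs
  termination_by l => l.length
  decreasing_by
  all_goals simp_all
  exact cs.length_dropWhile_le pvTokKey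

def tokenize_for_decimal_py_alt (expression : String) : List String :=
  pvTokGroups expression.toList

-- ===== PRECONDITION & SPEC =====
def Spec_tokenize_for_decimal_py (expression : String) (out : List String) : Prop := out = tokenize_for_decimal_py_alt expression
instance (expression : String) (out : List String) : Decidable (Spec_tokenize_for_decimal_py expression out) := by unfold Spec_tokenize_for_decimal_py; infer_instance

-- ===== CLAIM (what is proved, stated in full; the proofs are below) =====
def Claim_equal_tokenize_for_decimal_py : Prop := ∀ (expression : String), Dom_tokenize_for_decimal_py expression → Spec_tokenize_for_decimal_py expression (tokenize_for_decimal_py expression)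

-- ===== LEMMAS AND PROOFS =====
-- groupsAux: B-side computation carrying A's pending token
def pvGroupsAux (acc : List Char) : List Char → List String
  | [] => if acc ≠ [] then [String.mk acc] else []
  | c :: cs =>
    if pvTokKey c then pvGroupsAux (acc ++ [c]) cs
    else (if acc ≠ [] then [String.mk acc] else []) ++ pvGroupsAux [] cs

theorem pvRunA_eq_groupsAux (l : List Char) : ∀ acc tks,
    (let st := l.foldl
      (fun (s : List Char × List String) char =>
        if PySem.Chars.isdigit char || char == '.' then (s.1 ++ [char], s.2)
        else if s.1 ≠ [] then ([], s.2 ++ [String.mk s.1]) else s)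
      (acc, tks)
     if st.1 ≠ [] then st.2 ++ [String.mk st.1] else st.2)
    = tks ++ pvGroupsAux acc l := by
  induction l with
  | nil => intro acc tks; by_cases h : acc = [] <;> simp [pvGroupsAux, h]
  | cons c cs ih =>
    intro acc tks
    simp only [List.foldl_cons, pvGroupsAux]
    by_cases hk : pvTokKey c
    · have hk' : (PySem.Chars.isdigit c || c == '.') = true := hk
      simp only [hk', if_pos, hk, if_true, ih]
    · have hk' : ¬ ((PySem.Chars.isdigit c || c == '.') = true) := hk
      by_cases ha : acc = []
      · simp only [if_neg hk', ha, ne_eq, not_true_eq_false, if_false, ih, hk,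
          Bool.false_eq_true, List.nil_append]
      · simp only [if_neg hk', ne_eq, ha, not_false_eq_true, if_true, ih, hk,
          Bool.false_eq_true, if_false]
        simp [List.append_assoc]

theorem pvGroupsAux_eq (l : List Char) : ∀ acc,
    pvGroupsAux acc l =
      if acc = [] then pvTokGroups l
      else String.mk (acc ++ l.takeWhile pvTokKey) :: pvTokGroups (l.dropWhile pvTokKey) := by
  induction l with
  | nil =>
    intro acc
    by_cases h : acc = [] <;> simp [pvGroupsAux, pvTokGroups, h]
  | cons c cs ih =>
    intro acc
    by_cases hk : pvTokKey c
    · by_cases ha : acc = []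
      · simp [pvGroupsAux, hk, ih, ha, pvTokGroups, List.takeWhile_cons, List.dropWhile_cons]
      · simp [pvGroupsAux, hk, ih, ha, List.takeWhile_cons, List.dropWhile_cons]
    · by_cases ha : acc = []
      · simp [pvGroupsAux, hk, ih, ha, pvTokGroups]
      · simp [pvGroupsAux, hk, ih, ha, pvTokGroups, List.takeWhile_cons, List.dropWhile_cons]

-- ===== VERDICT (by name: the statement is the Claim_ definition above) =====
theorem tokenize_for_decimal_py_spec : Claim_equal_tokenize_for_decimal_py := by
  intro expression _
  unfold Spec_tokenize_for_decimal_py tokenize_for_decimal_py tokenize_for_decimal_py_alt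
  rw [pvRunA_eq_groupsAux expression.toList [] [], pvGroupsAux_eq]
  simp
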